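-- pv_equiv track=rewrite | github.com/natebransc/HackerRank | flipBeautiful.py | flipBeautiful
-- ===== SOURCE A (Python) =====
-- def flipBeautiful(string: str) -> int:
--     # convert to list
--     s = []
--     count = 0
--     for c in string:
--         s.append(c)
--     # reverse the list
--     s.reverse()
--     try:
--         lastHead = s.index("H")
--         while lastHead < len(s):
--             if s[lastHead] == "T":
--                 count += 1
--             lastHead += 1
--         return count
--     # if no heads, then it's already perfect
--     except:
--         return 0
-- ===== SOURCE B (Python) =====
-- def flipBeautiful(string: str) -> int:
--     # single forward pass: record the T-count at each H; the last H's count survives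
--     t_count = 0
--     result = 0
--     for c in string:
--         if c == "T":
--             t_count += 1
--         if c == "H":
--             result = t_count
--     return result
-- ===== Notes on version B (the rewrite author's own statement) =====
-- stated objective: simpler
-- what changed: One forward pass keeping a running T-count and capturing it at every H (last capture wins), instead of building a list, reversing it, finding the first H with index() and counting Ts in a second index-driven while loop.
import Mathlib
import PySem

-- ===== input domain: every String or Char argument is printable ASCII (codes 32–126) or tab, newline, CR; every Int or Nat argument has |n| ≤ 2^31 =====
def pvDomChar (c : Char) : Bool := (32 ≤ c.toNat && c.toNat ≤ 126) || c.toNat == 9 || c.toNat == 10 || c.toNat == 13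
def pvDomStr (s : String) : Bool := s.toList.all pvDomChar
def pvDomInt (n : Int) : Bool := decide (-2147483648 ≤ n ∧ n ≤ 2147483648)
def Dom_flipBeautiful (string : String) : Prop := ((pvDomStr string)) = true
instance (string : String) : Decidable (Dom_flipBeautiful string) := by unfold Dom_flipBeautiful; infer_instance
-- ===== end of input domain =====

-- B does one forward pass with a running T-count captured at every H; A builds a reversed list,
-- finds the first H with index() and counts Ts from there in a while loop. Same value everywhere (A is total).

-- ===== PORT A =====
-- the 'while lastHead < len(s)' loop of A: index walk, counting 'T's
def pvA_while (s : List Char) (i : Nat) (count : Int) : Int :=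
  if h : i < s.length then
    pvA_while s (i + 1) (if s[i] = 'T' then count + 1 else count)
  else count
termination_by s.length - i

def flipBeautiful (string : String) : Int :=
  -- s = [] ; for c in string: s.append(c) ; s.reverse()
  let s : List Char := (string.toList.foldl (fun acc c => acc ++ [c]) []).reverse
  -- try: lastHead = s.index("H") … except: return 0
  match PySem.List.index? s 'H' with
  | some lastHead => pvA_while s lastHead 0
  | none => 0

-- ===== PORT B =====
def flipBeautiful_alt (string : String) : Int :=
  let st := string.toList.foldl
    (fun (p : Int × Int) c =>
      let t := if c = 'T' then p.1 + 1 else p.1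
      let r := if c = 'H' then t else p.2
      (t, r)) (0, 0)
  st.2

-- ===== PRECONDITION & SPEC =====
def Spec_flipBeautiful (string : String) (out : Int) : Prop := out = flipBeautiful_alt string
instance (string : String) (out : Int) : Decidable (Spec_flipBeautiful string out) := by unfold Spec_flipBeautiful; infer_instance

-- ===== CLAIM (what is proved, stated in full; the proofs are below) =====
def Claim_equal_flipBeautiful : Prop := ∀ (string : String), Dom_flipBeautiful string → Spec_flipBeautiful string (flipBeautiful string)

-- ===== LEMMAS AND PROOFS =====

-- number of 'T's, as an Int
def pvCntT (l : List Char) : Int := (l.count 'T' : Int)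

lemma pvCntT_cons (c : Char) (l : List Char) :
    pvCntT (c :: l) = (if c = 'T' then pvCntT l + 1 else pvCntT l) := by
  simp [pvCntT, List.count_cons]
  split_ifs <;> omega

lemma pvCntT_reverse (l : List Char) : pvCntT l.reverse = pvCntT l := by
  simp [pvCntT]

lemma pvA_while_eq (s : List Char) (i : Nat) (count : Int) :
    pvA_while s i count = count + pvCntT (s.drop i) := by
  by_cases h : i < s.length
  · rw [pvA_while, dif_pos h, pvA_while_eq s (i + 1)]
    rw [List.drop_eq_getElem_cons h, pvCntT_cons]
    split_ifs <;> omega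
  · rw [pvA_while, dif_neg h]
    rw [List.drop_of_length_le (by omega)]
    simp [pvCntT]
termination_by s.length - i

lemma pv_append_id (l : List Char) : l.foldl (fun acc c => acc ++ [c]) [] = l := by
  have h : ∀ (l acc : List Char), l.foldl (fun acc c => acc ++ [c]) acc = acc ++ l := by
    intro l
    induction l with
    | nil => simp
    | cons c t ih => intro acc; simp [List.foldl, ih]
  simpa using h l []

-- B's fold, as a function of the final reversed suffix structure
lemma pvB_fold_eq (l : List Char) (t r : Int) :
    (l.foldl
      (fun (p : Int × Int) c =>
        let t := if c = 'T' then p.1 + 1 else p.1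
        let rr := if c = 'H' then t else p.2
        (t, rr)) (t, r)) =
    (t + pvCntT l,
      match PySem.List.index? l.reverse 'H' with
      | some i => t + pvCntT (l.reverse.drop i)
      | none => r) := by
  induction l using List.reverseRecOn generalizing t r with
  | nil => simp [pvCntT]
  | append_singleton l' c ih =>
      rw [List.foldl_append, ih]
      simp only [List.foldl_cons, List.foldl_nil, List.reverse_append, List.reverse_singleton,
        List.singleton_append]
      by_cases hc : c = 'H'
      · subst hc
        rw [PySem.List.index?_cons_self]
        simp only [Prod.mk.injEq]
        refine ⟨?_, ?_⟩
        · simp [pvCntT, List.count_append]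
        · simp [pvCntT_reverse, pvCntT_cons]
      · rw [PySem.List.index?_cons_of_ne _ hc]
        simp only [Prod.mk.injEq]
        refine ⟨?_, ?_⟩
        · simp [pvCntT, List.count_append]
          by_cases hT : c = 'T' <;> simp [hT] <;> omega
        · cases hix : PySem.List.index? l'.reverse 'H' with
          | none => simp [hc]
          | some i => simp [hc]

-- ===== VERDICT (by name: the statement is the Claim_ definition above) =====
theorem flipBeautiful_spec : Claim_equal_flipBeautiful := by
  intro string _
  unfold Spec_flipBeautiful flipBeautiful flipBeautiful_alt
  rw [pv_append_id, pvB_fold_eq]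
  rw [PySem.List.index?_eq_idxOf?]
  cases hix : List.idxOf? 'H' string.toList.reverse with
  | none => simp [hix]
  | some i => simp [hix, pvA_while_eq]
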